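-- pv_equiv track=rewrite | github.com/javierchan/oci | inventory/src/oci_inventory/cli.py | _relationships_by_source
-- ===== SOURCE A (Python) =====
-- from typing import Any, Dict, Iterable, List, Optional, Sequence, Tuple, Union
--
-- def _relationships_by_source(relationships: Sequence[Dict[str, str]]) -> Dict[str, List[Dict[str, str]]]:
--     by_source: Dict[str, List[Dict[str, str]]] = {}
--     for rel in relationships:
--         src = str(rel.get("source_ocid") or "")
--         if not src:
--             continue
--         by_source.setdefault(src, []).append(rel)
--     return by_source
-- ===== SOURCE B (Python) =====
-- from typing import Any, Dict, Iterable, List, Optional, Sequence, Tuple, Union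
--
-- def _relationships_by_source(relationships: Sequence[Dict[str, str]]) -> Dict[str, List[Dict[str, str]]]:
--     # two passes: collect distinct non-empty source keys in first-seen order,
--     # then build each group by filtering the input once per key
--     keys: List[str] = []
--     for rel in relationships:
--         src = str(rel.get("source_ocid") or "")
--         if src and src not in keys:
--             keys.append(src)
--     return {k: [r for r in relationships if str(r.get("source_ocid") or "") == k] for k in keys}
-- ===== Notes on version B (the rewrite author's own statement) =====
-- stated objective: alternative
-- what changed: Replaced the incremental setdefault/append dict accumulation with a two-phase pass: collect the distinct non-empty source keys in first-seen order, then build each group by filtering the input per key.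
import Mathlib
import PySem

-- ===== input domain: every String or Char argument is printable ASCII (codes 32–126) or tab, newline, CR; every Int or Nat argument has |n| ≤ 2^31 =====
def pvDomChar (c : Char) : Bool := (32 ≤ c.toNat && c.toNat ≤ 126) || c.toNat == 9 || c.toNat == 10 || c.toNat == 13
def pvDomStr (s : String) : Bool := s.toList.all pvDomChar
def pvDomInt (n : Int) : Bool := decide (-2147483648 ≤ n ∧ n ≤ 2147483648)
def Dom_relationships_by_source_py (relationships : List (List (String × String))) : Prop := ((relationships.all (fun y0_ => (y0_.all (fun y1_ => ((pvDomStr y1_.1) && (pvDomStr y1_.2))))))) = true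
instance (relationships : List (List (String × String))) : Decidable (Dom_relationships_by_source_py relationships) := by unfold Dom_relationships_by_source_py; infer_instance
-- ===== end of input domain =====

-- B replaces A's incremental setdefault/append accumulation with a two-phase pass
-- (distinct non-empty keys in first-seen order, then one filter per key); same value, no speed claim.

-- str(rel.get("source_ocid") or "") — None and "" both become "" (identical expression in both Pythons)
def srcKey (rel : List (String × String)) : String :=
  PySem.Dict.getD (PySem.Dict.mk rel) "source_ocid" ""

-- ===== PORT A =====
def relationships_by_source_py (relationships : List (List (String × String))) : List (String × List (List (String × String))) :=
  (relationships.foldl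
    (fun by_source rel =>
      let src := srcKey rel
      if src = "" then by_source
      else PySem.Dict.modify by_source src [] (fun l => l ++ [rel]))
    PySem.Dict.empty).items

-- ===== PORT B =====
def relationships_by_source_py_alt (relationships : List (List (String × String))) : List (String × List (List (String × String))) :=
  let keys := relationships.foldl
    (fun ks rel =>
      let src := srcKey rel
      if src ≠ "" ∧ src ∉ ks then ks ++ [src] else ks)
    []
  keys.map (fun k => (k, relationships.filter (fun r => srcKey r = k)))

-- ===== PRECONDITION & SPEC =====
def Spec_relationships_by_source_py (relationships : List (List (String × String))) (out : List (String × List (List (String × String)))) : Prop := out = relationships_by_source_py_alt relationships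
instance (relationships : List (List (String × String))) (out : List (String × List (List (String × String)))) : Decidable (Spec_relationships_by_source_py relationships out) := by unfold Spec_relationships_by_source_py; infer_instance

-- ===== CLAIM (what is proved, stated in full; the proofs are below) =====
def Claim_equal_relationships_by_source_py : Prop := ∀ (relationships : List (List (String × String))), Dom_relationships_by_source_py relationships → Spec_relationships_by_source_py relationships (relationships_by_source_py relationships)

-- ===== LEMMAS AND PROOFS =====

-- the (key, rel) pairs A actually feeds into the dict (proof-side device)
def pvPairs (rels : List (List (String × String))) : List (String × List (String × String)) :=
  rels.filterMap (fun rel => if srcKey rel = "" then none else some (srcKey rel, rel))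

-- A's conditional loop is the unconditional modify-loop over pvPairs
theorem foldlA_eq_pairs (rels : List (List (String × String)))
    (d : PySem.Dict String (List (List (String × String)))) :
    rels.foldl
      (fun by_source rel =>
        let src := srcKey rel
        if src = "" then by_source
        else PySem.Dict.modify by_source src [] (fun l => l ++ [rel])) d
    = (pvPairs rels).foldl (fun d p => PySem.Dict.modify d p.1 [] (fun l => l ++ [p.2])) d := by
  induction rels generalizing d with
  | nil => rfl
  | cons r t ih =>
    by_cases h : srcKey r = "" <;> simp [pvPairs, h, ih]

-- B's key loop is Set.ofList of the pair keys
theorem foldlB_eq_keys (rels : List (List (String × String))) (ks : PySem.Set String) :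
    rels.foldl
      (fun ks rel =>
        let src := srcKey rel
        if src ≠ "" ∧ src ∉ ks then ks ++ [src] else ks) ks
    = (pvPairs rels).foldl (fun s p => PySem.Set.add s p.1) ks := by
  induction rels generalizing ks with
  | nil => rfl
  | cons r t ih =>
    by_cases h : srcKey r = ""
    · simp [pvPairs, h] at *; simp [ih]
    · by_cases hm : srcKey r ∈ ks <;>
        simp [pvPairs, h, hm, PySem.Set.add_of_mem, PySem.Set.add_of_not_mem, ih]

-- the groups: filtering rels by key k (k ≠ "") = the pair values at k
theorem filter_eq_pairs (rels : List (List (String × String))) (k : String) (hk : k ≠ "") :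
    rels.filter (fun r => srcKey r = k)
    = ((pvPairs rels).filter (fun p => p.1 == k)).map (·.2) := by
  induction rels with
  | nil => rfl
  | cons r t ih =>
    by_cases h : srcKey r = ""
    · have hne : ¬ (srcKey r = k) := fun e => hk (h ▸ e.symm ▸ rfl)
      simpa [pvPairs, h, hk, List.filter_cons, hne] using ih
    · by_cases he : srcKey r = k <;>
        simp [pvPairs, h, hk, he, ih]

-- every key of pvPairs is non-empty
theorem pairs_key_ne (rels : List (List (String × String))) :
    ∀ k ∈ (pvPairs rels).map (·.1), k ≠ "" := by
  intro k hk
  simp only [pvPairs, List.map_filterMap, List.mem_filterMap] at hk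
  obtain ⟨r, _, hr⟩ := hk
  by_cases h : srcKey r = "" <;> simp [h] at hr
  exact hr ▸ h

-- ===== VERDICT (by name: the statement is the Claim_ definition above) =====
theorem relationships_by_source_py_spec : Claim_equal_relationships_by_source_py := by
  intro rels _
  show relationships_by_source_py rels = relationships_by_source_py_alt rels
  unfold relationships_by_source_py relationships_by_source_py_alt
  rw [foldlA_eq_pairs, foldlB_eq_keys]
  rw [← PySem.Set.update_map_eq_foldl_add, PySem.Set.update_nil_left]
  set P := pvPairs rels with hP
  have hkeys : ((P.foldl (fun d p => PySem.Dict.modify d p.1 [] (fun l => l ++ [p.2])) PySem.Dict.empty)).keys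
      = PySem.Set.ofList (P.map (·.1)) := by
    rw [PySem.Dict.keys_foldl_modify_key]
    simp [PySem.Dict.empty, PySem.Dict.keys, PySem.Set.update_nil_left]
  have hnd : ((P.foldl (fun d p => PySem.Dict.modify d p.1 [] (fun l => l ++ [p.2])) PySem.Dict.empty)).keys.Nodup := by
    rw [hkeys]; exact PySem.Set.nodup_ofList _
  rw [PySem.Dict.items_eq_map_keys _ hnd ([] : List (List (String × String)))]
  rw [hkeys]
  apply List.map_congr_left
  intro k hk
  have hkne : k ≠ "" := pairs_key_ne rels k (by
    have := (PySem.Set.mem_ofList (xs := P.map (·.1)) (y := k)).1 hk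
    exact this)
  rw [PySem.Dict.getD_foldl_modify_append]
  rw [filter_eq_pairs rels k hkne, ← hP]
  simp [PySem.Dict.empty, PySem.Dict.getD, PySem.Dict.get?]
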